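-- pv_equiv track=rewrite | github.com/cltconcept/aftt-scraper | src/scraper/clubs_scraper.py | extract_province_from_code
-- ===== SOURCE A (Python) =====
-- from typing import List, Optional
--
-- def extract_province_from_code(code: str) -> Optional[str]:
--     """
--     Extrait la province/région à partir du code du club.
--
--     Les préfixes connus sont :
--     - A : Antwerpen (Anvers)
--     - BBW : Brabant Wallon / Bruxelles
--     - H : Hainaut
--     - L : Liège
--     - Lx : Luxembourg
--     - N : Namur
--     - OVL : Oost-Vlaanderen (Flandre Orientale)
--     - Vl-B : Vlaams-Brabant (Brabant Flamand)
--     - WVL : West-Vlaanderen (Flandre Occidentale)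
--     - VTTL : Fédération Flamande
--     - AFTT : Fédération Francophone
--     - FR : France (mutation)
--     """
--     province_mapping = {
--         'A': 'Antwerpen',
--         'BBW': 'Brabant Wallon / Bruxelles',
--         'H': 'Hainaut',
--         'L': 'Liège',
--         'Lx': 'Luxembourg',
--         'N': 'Namur',
--         'OVL': 'Oost-Vlaanderen',
--         'Vl-B': 'Vlaams-Brabant',
--         'WVL': 'West-Vlaanderen',
--         'VTTL': 'VTTL (Fédération Flamande)',
--         'AFTT': 'AFTT (Fédération Francophone)',
--         'FR': 'France (mutation)',
--     }
--
--     # Essayer de matcher les préfixes du plus long au plus court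
--     for prefix in sorted(province_mapping.keys(), key=len, reverse=True):
--         if code.upper().startswith(prefix.upper()):
--             return province_mapping[prefix]
--
--     return None
-- ===== SOURCE B (Python) =====
-- from typing import Optional
--
-- # Buckets of normalized (uppercased) prefixes, grouped by prefix length,
-- # probed from the longest length to the shortest.
-- _BUCKETS = [
--     (4, {'VL-B': 'Vlaams-Brabant',
--          'VTTL': 'VTTL (Fédération Flamande)',
--          'AFTT': 'AFTT (Fédération Francophone)'}),
--     (3, {'BBW': 'Brabant Wallon / Bruxelles',
--          'OVL': 'Oost-Vlaanderen',
--          'WVL': 'West-Vlaanderen'}),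
--     (2, {'LX': 'Luxembourg',
--          'FR': 'France (mutation)'}),
--     (1, {'A': 'Antwerpen',
--          'H': 'Hainaut',
--          'L': 'Liège',
--          'N': 'Namur'}),
-- ]
--
-- def extract_province_from_code(code: str) -> Optional[str]:
--     up = code.upper()
--     for length, bucket in _BUCKETS:
--         hit = bucket.get(up[:length])
--         if hit is not None:
--             return hit
--     return None
-- ===== Notes on version B (the rewrite author's own statement) =====
-- stated objective: alternative
-- what changed: Replaces A's per-call sort of the prefix table and longest-first startswith scan over all 12 prefixes with four precomputed length-bucketed dicts of uppercased prefixes, probed by one slice-and-hash lookup per length (4,3,2,1).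
import Mathlib
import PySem

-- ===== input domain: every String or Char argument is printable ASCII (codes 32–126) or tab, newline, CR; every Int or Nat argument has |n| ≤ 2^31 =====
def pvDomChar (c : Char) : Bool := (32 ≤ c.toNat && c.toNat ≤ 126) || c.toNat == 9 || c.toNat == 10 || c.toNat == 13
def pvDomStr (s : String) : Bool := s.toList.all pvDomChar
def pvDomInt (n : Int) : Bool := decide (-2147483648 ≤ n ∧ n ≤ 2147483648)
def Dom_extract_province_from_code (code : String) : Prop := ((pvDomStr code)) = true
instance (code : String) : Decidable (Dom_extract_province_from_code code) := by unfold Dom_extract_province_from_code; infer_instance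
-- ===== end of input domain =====

-- B replaces A's per-call sort + longest-first startswith scan with four precomputed
-- length-bucketed dicts of uppercased prefixes probed by slicing (objective: alternative decomposition).

-- ===== PORT A =====
def pvProvinceMapping : PySem.Dict String String :=
  PySem.Dict.ofList
    [("A", "Antwerpen"),
     ("BBW", "Brabant Wallon / Bruxelles"),
     ("H", "Hainaut"),
     ("L", "Liège"),
     ("Lx", "Luxembourg"),
     ("N", "Namur"),
     ("OVL", "Oost-Vlaanderen"),
     ("Vl-B", "Vlaams-Brabant"),
     ("WVL", "West-Vlaanderen"),
     ("VTTL", "VTTL (Fédération Flamande)"),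
     ("AFTT", "AFTT (Fédération Francophone)"),
     ("FR", "France (mutation)")]

-- A's 'for prefix in sorted(...)' loop; province_mapping[prefix] is always a hit here
def pvLoopA (code : String) : List String → Option String
  | [] => none
  | p :: rest =>
    if PySem.Str.startswith (PySem.Str.upper code) (PySem.Str.upper p) then
      PySem.Dict.get? pvProvinceMapping p
    else pvLoopA code rest

def extract_province_from_code (code : String) : Option String :=
  pvLoopA code
    (PySem.List.sorted (PySem.Dict.keys pvProvinceMapping) (fun p => PySem.Str.len p) true)

-- ===== PORT B =====
def pvBuckets : List (Int × PySem.Dict (List Char) String) :=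
  [(4, PySem.Dict.ofList
        [("VL-B".toList, "Vlaams-Brabant"),
         ("VTTL".toList, "VTTL (Fédération Flamande)"),
         ("AFTT".toList, "AFTT (Fédération Francophone)")]),
   (3, PySem.Dict.ofList
        [("BBW".toList, "Brabant Wallon / Bruxelles"),
         ("OVL".toList, "Oost-Vlaanderen"),
         ("WVL".toList, "West-Vlaanderen")]),
   (2, PySem.Dict.ofList
        [("LX".toList, "Luxembourg"),
         ("FR".toList, "France (mutation)")]),
   (1, PySem.Dict.ofList
        [("A".toList, "Antwerpen"),
         ("H".toList, "Hainaut"),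
         ("L".toList, "Liège"),
         ("N".toList, "Namur")])]

-- B's 'for length, bucket in _BUCKETS' loop: probe bucket.get(up[:length])
def pvLoopB (up : List Char) : List (Int × PySem.Dict (List Char) String) → Option String
  | [] => none
  | (len, b) :: rest =>
    match PySem.Dict.get? b (PySem.List.slice up none (some len)) with
    | some hit => some hit
    | none => pvLoopB up rest

def extract_province_from_code_alt (code : String) : Option String :=
  pvLoopB (PySem.Str.upper code).toList pvBuckets

-- ===== PRECONDITION & SPEC =====
def Spec_extract_province_from_code (code : String) (out : Option String) : Prop := out = extract_province_from_code_alt code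
instance (code : String) (out : Option String) : Decidable (Spec_extract_province_from_code code out) := by unfold Spec_extract_province_from_code; infer_instance

-- ===== CLAIM (what is proved, stated in full; the proofs are below) =====
def Claim_equal_extract_province_from_code : Prop := ∀ (code : String), Dom_extract_province_from_code code → Spec_extract_province_from_code code (extract_province_from_code code)

-- ===== LEMMAS AND PROOFS =====
-- startswith as an equality test against the matching-length prefix slice
theorem pv_startswith_eq_take (u p : List Char) :
    PySem.Chars.startswith u p = (p == List.take p.length u) := by
  by_cases h : p <+: u
  · rw [(PySem.Chars.startswith_iff u p).mpr h, ← List.prefix_iff_eq_take.mp h]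
    exact (beq_self_eq_true p).symm
  · have hb : PySem.Chars.startswith u p = false := by
      cases hs : PySem.Chars.startswith u p
      · rfl
      · exact absurd ((PySem.Chars.startswith_iff u p).mp hs) h
    have ht : p ≠ List.take p.length u := fun he => h (List.prefix_iff_eq_take.mpr he)
    rw [hb]
    exact (beq_eq_false_iff_ne.mpr ht).symm

-- ===== VERDICT (by name: the statement is the Claim_ definition above) =====
set_option maxRecDepth 65536 in
set_option maxHeartbeats 2000000 in
theorem extract_province_from_code_spec : Claim_equal_extract_province_from_code := by
  intro code _
  unfold Spec_extract_province_from_code extract_province_from_code extract_province_from_code_alt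
  have hs : PySem.List.sorted (PySem.Dict.keys pvProvinceMapping) (fun p => PySem.Str.len p) true
      = ["Vl-B", "VTTL", "AFTT", "BBW", "OVL", "WVL", "Lx", "FR", "A", "H", "L", "N"] := by decide
  have e1 : PySem.Chars.upper "Vl-B".toList = ['V','L','-','B'] := by decide
  have e2 : PySem.Chars.upper "VTTL".toList = ['V','T','T','L'] := by decide
  have e3 : PySem.Chars.upper "AFTT".toList = ['A','F','T','T'] := by decide
  have e4 : PySem.Chars.upper "BBW".toList = ['B','B','W'] := by decide
  have e5 : PySem.Chars.upper "OVL".toList = ['O','V','L'] := by decide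
  have e6 : PySem.Chars.upper "WVL".toList = ['W','V','L'] := by decide
  have e7 : PySem.Chars.upper "Lx".toList = ['L','X'] := by decide
  have e8 : PySem.Chars.upper "FR".toList = ['F','R'] := by decide
  have e9 : PySem.Chars.upper "A".toList = ['A'] := by decide
  have e10 : PySem.Chars.upper "H".toList = ['H'] := by decide
  have e11 : PySem.Chars.upper "L".toList = ['L'] := by decide
  have e12 : PySem.Chars.upper "N".toList = ['N'] := by decide
  have m1 : PySem.Dict.get? pvProvinceMapping "Vl-B" = some "Vlaams-Brabant" := by decide
  have m2 : PySem.Dict.get? pvProvinceMapping "VTTL" = some "VTTL (Fédération Flamande)" := by decide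
  have m3 : PySem.Dict.get? pvProvinceMapping "AFTT" = some "AFTT (Fédération Francophone)" := by decide
  have m4 : PySem.Dict.get? pvProvinceMapping "BBW" = some "Brabant Wallon / Bruxelles" := by decide
  have m5 : PySem.Dict.get? pvProvinceMapping "OVL" = some "Oost-Vlaanderen" := by decide
  have m6 : PySem.Dict.get? pvProvinceMapping "WVL" = some "West-Vlaanderen" := by decide
  have m7 : PySem.Dict.get? pvProvinceMapping "Lx" = some "Luxembourg" := by decide
  have m8 : PySem.Dict.get? pvProvinceMapping "FR" = some "France (mutation)" := by decide
  have m9 : PySem.Dict.get? pvProvinceMapping "A" = some "Antwerpen" := by decide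
  have m10 : PySem.Dict.get? pvProvinceMapping "H" = some "Hainaut" := by decide
  have m11 : PySem.Dict.get? pvProvinceMapping "L" = some "Liège" := by decide
  have m12 : PySem.Dict.get? pvProvinceMapping "N" = some "Namur" := by decide
  have hb1 : PySem.Dict.ofList
        [("VL-B".toList, "Vlaams-Brabant"),
         ("VTTL".toList, "VTTL (Fédération Flamande)"),
         ("AFTT".toList, "AFTT (Fédération Francophone)")]
      = PySem.Dict.mk
        [(['V','L','-','B'], "Vlaams-Brabant"),
         (['V','T','T','L'], "VTTL (Fédération Flamande)"),
         (['A','F','T','T'], "AFTT (Fédération Francophone)")] := by decide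
  have hb2 : PySem.Dict.ofList
        [("BBW".toList, "Brabant Wallon / Bruxelles"),
         ("OVL".toList, "Oost-Vlaanderen"),
         ("WVL".toList, "West-Vlaanderen")]
      = PySem.Dict.mk
        [(['B','B','W'], "Brabant Wallon / Bruxelles"),
         (['O','V','L'], "Oost-Vlaanderen"),
         (['W','V','L'], "West-Vlaanderen")] := by decide
  have hb3 : PySem.Dict.ofList
        [("LX".toList, "Luxembourg"), ("FR".toList, "France (mutation)")]
      = PySem.Dict.mk [(['L','X'], "Luxembourg"), (['F','R'], "France (mutation)")] := by decide
  have hb4 : PySem.Dict.ofList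
        [("A".toList, "Antwerpen"), ("H".toList, "Hainaut"),
         ("L".toList, "Liège"), ("N".toList, "Namur")]
      = PySem.Dict.mk
        [(['A'], "Antwerpen"), (['H'], "Hainaut"), (['L'], "Liège"), (['N'], "Namur")] := by decide
  have hnil : ∀ x : List Char, (PySem.Dict.mk ([] : List (List Char × String))).get? x = none := by
    intro x; rfl
  have s4 : ∀ v : List Char, PySem.List.slice v none (some (4:Int)) = v.take 4 := by
    intro v; simp [pysem]
  have s3 : ∀ v : List Char, PySem.List.slice v none (some (3:Int)) = v.take 3 := by
    intro v; simp [pysem]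
  have s2 : ∀ v : List Char, PySem.List.slice v none (some (2:Int)) = v.take 2 := by
    intro v; simp [pysem]
  have s1 : ∀ v : List Char, PySem.List.slice v none (some (1:Int)) = v.take 1 := by
    intro v; simp [pysem]
  rw [hs]
  simp only [pvLoopA, pvLoopB, pvBuckets]
  simp only [PySem.Str.startswith_eq, PySem.Str.toList_upper]
  simp only [e1, e2, e3, e4, e5, e6, e7, e8, e9, e10, e11, e12,
             m1, m2, m3, m4, m5, m6, m7, m8, m9, m10, m11, m12,
             pv_startswith_eq_take]
  simp only [List.length_cons, List.length_nil, Nat.reduceAdd, Nat.zero_add]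
  rw [hb1, hb2, hb3, hb4]
  simp only [PySem.Dict.get?_mk_cons, hnil, s4, s3, s2, s1]
  by_cases h1 : (['V','L','-','B'] == List.take 4 (PySem.Chars.upper code.toList)) = true
  · simp only [if_pos h1]
  simp only [if_neg h1]
  by_cases h2 : (['V','T','T','L'] == List.take 4 (PySem.Chars.upper code.toList)) = true
  · simp only [if_pos h2]
  simp only [if_neg h2]
  by_cases h3 : (['A','F','T','T'] == List.take 4 (PySem.Chars.upper code.toList)) = true
  · simp only [if_pos h3]
  simp only [if_neg h3]
  by_cases h4 : (['B','B','W'] == List.take 3 (PySem.Chars.upper code.toList)) = true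
  · simp only [if_pos h4]
  simp only [if_neg h4]
  by_cases h5 : (['O','V','L'] == List.take 3 (PySem.Chars.upper code.toList)) = true
  · simp only [if_pos h5]
  simp only [if_neg h5]
  by_cases h6 : (['W','V','L'] == List.take 3 (PySem.Chars.upper code.toList)) = true
  · simp only [if_pos h6]
  simp only [if_neg h6]
  by_cases h7 : (['L','X'] == List.take 2 (PySem.Chars.upper code.toList)) = true
  · simp only [if_pos h7]
  simp only [if_neg h7]
  by_cases h8 : (['F','R'] == List.take 2 (PySem.Chars.upper code.toList)) = true
  · simp only [if_pos h8]
  simp only [if_neg h8]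
  by_cases h9 : (['A'] == List.take 1 (PySem.Chars.upper code.toList)) = true
  · simp only [if_pos h9]
  simp only [if_neg h9]
  by_cases h10 : (['H'] == List.take 1 (PySem.Chars.upper code.toList)) = true
  · simp only [if_pos h10]
  simp only [if_neg h10]
  by_cases h11 : (['L'] == List.take 1 (PySem.Chars.upper code.toList)) = true
  · simp only [if_pos h11]
  simp only [if_neg h11]
  by_cases h12 : (['N'] == List.take 1 (PySem.Chars.upper code.toList)) = true
  · simp only [if_pos h12]
  simp only [if_neg h12]
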